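-- pv_equiv track=rewrite | github.com/pasqualc/Python-Examples | xorcount0and1.py | countUnsetBits
-- ===== SOURCE A (Python) =====
-- def countUnsetBits(n):
--     count = 0
--     x = 1
--     while(x < n + 1):
--         if ((x & n) == 0):
--             count += 1
--         x = x << 1
--     return count
-- ===== SOURCE B (Python) =====
-- def countUnsetBits(n):
--     if n <= 0:
--         return 0
--     return n.bit_length() - bin(n).count('1')
-- ===== Notes on version B (the rewrite author's own statement) =====
-- stated objective: idiomatic
-- what changed: Replaces the explicit bit-by-bit loop with a closed form: unset bits below the top set bit = bit_length minus popcount, via the built-ins bit_length() and bin().count('1'), with 0 for n <= 0 where the loop never runs.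
import Mathlib
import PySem

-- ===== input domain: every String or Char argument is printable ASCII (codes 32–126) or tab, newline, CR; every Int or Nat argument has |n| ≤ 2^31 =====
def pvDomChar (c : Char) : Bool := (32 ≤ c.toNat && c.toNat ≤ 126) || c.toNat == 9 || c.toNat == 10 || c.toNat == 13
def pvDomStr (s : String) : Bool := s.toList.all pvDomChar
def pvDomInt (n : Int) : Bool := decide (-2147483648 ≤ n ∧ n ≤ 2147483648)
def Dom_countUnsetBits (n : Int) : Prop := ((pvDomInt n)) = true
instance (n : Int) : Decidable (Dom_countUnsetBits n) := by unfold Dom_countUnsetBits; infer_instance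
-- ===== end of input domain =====

-- B replaces A's explicit bit-by-bit loop with the closed form bit_length − popcount (idiomatic; not claimed faster).

-- ===== PORT A =====
-- A's while loop: x runs over 1, 2, 4, … while x < n + 1; count += 1 when (x & n) == 0.
-- x is kept as a Nat (in Python it is always a positive power of two); the `0 < x`
-- conjunct only makes the recursion total and is vacuous on every reachable call.
def pvLoopA (n : Int) (x : Nat) (count : Int) : Int :=
  if h : (x : Int) < n + 1 ∧ 0 < x then
    pvLoopA n (x <<< 1) (if PySem.Int.band (x : Int) n == 0 then count + 1 else count)
  else count
termination_by (n + 1 - (x : Int)).toNat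
decreasing_by
  simp only [Nat.shiftLeft_eq, pow_one]
  push_cast
  omega

def countUnsetBits (n : Int) : Int := pvLoopA n 1 0

-- ===== PORT B =====
-- n.bit_length() and bin(n).count('1') are ported by PySem.Int.bitLength / bitCount.
def countUnsetBits_alt (n : Int) : Int :=
  if n ≤ 0 then 0
  else (PySem.Int.bitLength n : Int) - (PySem.Int.bitCount n : Int)

-- ===== PRECONDITION & SPEC =====
def Spec_countUnsetBits (n : Int) (out : Int) : Prop := out = countUnsetBits_alt n
instance (n : Int) (out : Int) : Decidable (Spec_countUnsetBits n out) := by unfold Spec_countUnsetBits; infer_instance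

-- ===== CLAIM (what is proved, stated in full; the proofs are below) =====
def Claim_equal_countUnsetBits : Prop := ∀ (n : Int), Dom_countUnsetBits n → Spec_countUnsetBits n (countUnsetBits n)

-- ===== LEMMAS AND PROOFS =====

-- A's loop from x = 2^k computes bit_length − popcount of n.toNat / 2^k.
theorem pvLoopA_eq (p : Nat) : ∀ (n : Int) (k : Nat) (c : Int), 1 ≤ n →
    n.toNat / 2 ^ k = p →
    pvLoopA n (2 ^ k) c
      = c + ((PySem.Int.bitLength (p : Int) : Int) - (PySem.Int.bitCount (p : Int) : Int)) := by
  induction p using Nat.strong_induction_on with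
  | _ p ih =>
    intro n k c hn hp
    have hm : ((n.toNat : Int)) = n := Int.toNat_of_nonneg (by omega)
    rw [pvLoopA]
    by_cases hlt : ((2 ^ k : Nat) : Int) < n + 1
    · -- loop body runs: 2^k ≤ n
      have hkm : 2 ^ k ≤ n.toNat := by omega
      have hp1 : 1 ≤ p := by
        subst hp; exact (Nat.one_le_div_iff (Nat.two_pow_pos k)).2 hkm
      have hnext : n.toNat / 2 ^ (k + 1) = p / 2 := by
        rw [pow_succ, ← Nat.div_div_eq_div_mul, hp]
      have hand : PySem.Int.band ((2 ^ k : Nat) : Int) n = (((2 ^ k &&& n.toNat : Nat) : Int)) := by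
        conv_lhs => rw [← hm]
        rw [PySem.Int.band_natCast]
      have h2 : 2 ^ k &&& n.toNat = 2 ^ k * (n.toNat.testBit k).toNat := Nat.two_pow_and _ _
      have htb : n.toNat.testBit k = decide (n.toNat / 2 ^ k % 2 = 1) :=
        Nat.testBit_eq_decide_div_mod_eq
      have hsh : (2 ^ k) <<< 1 = 2 ^ (k + 1) := by
        rw [Nat.shiftLeft_eq, pow_one, pow_succ]
      have ihh := fun c => ih (p / 2) (by omega) n (k + 1) c hn hnext
      rw [dif_pos ⟨hlt, Nat.two_pow_pos k⟩, hsh]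
      rw [PySem.Int.bitLength_natCast hp1, PySem.Int.bitCount_natCast hp1]
      have hbit : n.toNat / 2 ^ k % 2 = p % 2 := by rw [hp]
      by_cases hz : p % 2 = 0
      · have hb : PySem.Int.band ((2 ^ k : Nat) : Int) n = 0 := by
          rw [hand, h2, htb, hbit, hz]; norm_num
        rw [if_pos (by push_cast at hb ⊢; simp [hb]), ihh _]
        push_cast [hz]; omega
      · have hone : p % 2 = 1 := by omega
        have hb : ¬ (PySem.Int.band ((2 ^ k : Nat) : Int) n == 0) = true := by
          rw [hand, h2, htb, hbit, hone]
          simp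
        rw [if_neg (by push_cast at hb ⊢; simpa using hb), ihh _]
        push_cast [hone]; omega
    · -- loop exits: n < 2^k, so p = 0
      have hp0 : p = 0 := by
        have hlt' : n.toNat < 2 ^ k := by omega
        rw [← hp, Nat.div_eq_of_lt hlt']
      subst hp0
      rw [dif_neg (by push Not; intro h; exact absurd h hlt)]
      simp [PySem.Int.bitLength_zero, PySem.Int.bitCount_zero]

-- ===== VERDICT (by name: the statement is the Claim_ definition above) =====
theorem countUnsetBits_spec : Claim_equal_countUnsetBits := by
  intro n _
  unfold Spec_countUnsetBits countUnsetBits countUnsetBits_alt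
  by_cases hn : n ≤ 0
  · rw [pvLoopA]
    have : ¬ ((1 : Nat) : Int) < n + 1 := by push_cast; omega
    rw [dif_neg (by push Not; intro h; exact absurd h this)]
    simp [hn]
  · have hn1 : 1 ≤ n := by omega
    have h := pvLoopA_eq n.toNat n 0 0 hn1 (by simp)
    rw [pow_zero] at h
    rw [h, Int.toNat_of_nonneg (by omega)]
    simp [hn]
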